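-- pv_equiv track=rewrite | github.com/ioaksenenko/neural_networks | utilities/datamaker/versions/v1.0/main.py | single_choice_question_generate
-- ===== SOURCE A (Python) =====
-- def single_choice_question_generate(n=1, is_item=True):
--     inputs = []
--     outputs = []
--     for i in range(n):
--         input = "_"
--         output = ("[item]" if is_item else "") + "_ "
--         for j in range(n):
--             if i == j:
--                 input += "=_"
--                 output += (". [singlechoice][choice value=1]_[/choice]" if j == 0 else
--                            " . [choice value=1]_[/choice]")
--             else:
--                 input += "~_"
--                 output += ((" " if j != 0 else "") + ". [singlechoice][choice]_[/choice]" if j == 0 else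
--                            " . [choice]_[/choice]")
--         output += "[/singlechoice]" + ("[/item]" if is_item else "")
--         inputs.append(input)
--         outputs.append(output)
--     return inputs, outputs
-- ===== SOURCE B (Python) =====
-- def single_choice_question_generate(n=1, is_item=True):
--     # precompute the common base rows once, then per i only flip position i
--     tokens = ["~_"] * n
--     choices = ["[choice]_[/choice]"] * n
--     pre = ("[item]" if is_item else "") + "_ . [singlechoice]"
--     post = "[/singlechoice]" + ("[/item]" if is_item else "")
--     inputs = []
--     outputs = []
--     for i in range(n):
--         t = tokens.copy()
--         t[i] = "=_"
--         c = choices.copy()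
--         c[i] = "[choice value=1]_[/choice]"
--         inputs.append("_" + "".join(t))
--         outputs.append(pre + " . ".join(c) + post)
--     return inputs, outputs
-- ===== Notes on version B (the rewrite author's own statement) =====
-- stated objective: alternative
-- what changed: Replaces A's per-(i,j) nested string-building loop with a precomputed base token/choice table, flipping only position i per row and assembling via join/' . '.join with the fixed '[singlechoice]' prefix hoisted out of the loop.
import Mathlib
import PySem

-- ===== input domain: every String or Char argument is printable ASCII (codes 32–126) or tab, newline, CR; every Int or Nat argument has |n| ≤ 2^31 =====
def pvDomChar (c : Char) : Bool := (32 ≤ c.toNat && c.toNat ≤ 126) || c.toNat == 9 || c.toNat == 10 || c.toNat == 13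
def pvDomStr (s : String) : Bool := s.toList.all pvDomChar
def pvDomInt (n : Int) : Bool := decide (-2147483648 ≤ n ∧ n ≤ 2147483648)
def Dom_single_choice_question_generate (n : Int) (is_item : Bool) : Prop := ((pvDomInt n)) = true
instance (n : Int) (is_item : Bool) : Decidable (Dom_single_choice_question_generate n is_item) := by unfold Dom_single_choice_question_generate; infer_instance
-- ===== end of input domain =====

-- B precomputes the base token/choice rows once and flips only position i per row; same asymptotic cost, different decomposition.

-- ===== PORT A =====
-- literal port of A: outer loop over range(n); inner loop over range(n) growing the (input, output) string pair
def single_choice_question_generate (n : Int) (is_item : Bool) : List String × List String :=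
  (PySem.List.pyRange 0 n 1).foldl (fun (st : List String × List String) i =>
    let io := (PySem.List.pyRange 0 n 1).foldl (fun (p : String × String) j =>
      if i = j then
        (p.1 ++ "=_",
         p.2 ++ (if j = 0 then ". [singlechoice][choice value=1]_[/choice]" else " . [choice value=1]_[/choice]"))
      else
        (p.1 ++ "~_",
         p.2 ++ (if j = 0 then ((if j ≠ 0 then " " else "") ++ ". [singlechoice][choice]_[/choice]") else " . [choice]_[/choice]")))
      ("_", (if is_item then "[item]" else "") ++ "_ ")
    (st.1 ++ [io.1], st.2 ++ [io.2 ++ "[/singlechoice]" ++ (if is_item then "[/item]" else "")]))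
    ([], [])

-- ===== PORT B =====
-- literal port of B: base rows built once, per i copy-and-set position i, assemble with ''.join / ' . '.join
def single_choice_question_generate_alt (n : Int) (is_item : Bool) : List String × List String :=
  let tokens := List.replicate n.toNat "~_"
  let choices := List.replicate n.toNat "[choice]_[/choice]"
  let pre := (if is_item then "[item]" else "") ++ "_ . [singlechoice]"
  let post := "[/singlechoice]" ++ (if is_item then "[/item]" else "")
  (PySem.List.pyRange 0 n 1).foldl (fun (st : List String × List String) i =>
    let t := tokens.set i.toNat "=_"
    let c := choices.set i.toNat "[choice value=1]_[/choice]"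
    (st.1 ++ ["_" ++ PySem.Str.join "" t], st.2 ++ [pre ++ PySem.Str.join " . " c ++ post]))
    ([], [])

-- ===== PRECONDITION & SPEC =====
def Spec_single_choice_question_generate (n : Int) (is_item : Bool) (out : List String × List String) : Prop := out = single_choice_question_generate_alt n is_item
instance (n : Int) (is_item : Bool) (out : List String × List String) : Decidable (Spec_single_choice_question_generate n is_item out) := by unfold Spec_single_choice_question_generate; infer_instance

-- ===== CLAIM (what is proved, stated in full; the proofs are below) =====
def Claim_equal_single_choice_question_generate : Prop := ∀ (n : Int) (is_item : Bool), Dom_single_choice_question_generate n is_item → Spec_single_choice_question_generate n is_item (single_choice_question_generate n is_item)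

-- ===== LEMMAS AND PROOFS =====

-- the per-position token and choice fragments A effectively builds
def pvTok (i j : Int) : String := if i = j then "=_" else "~_"
def pvCh (i j : Int) : String := if i = j then "[choice value=1]_[/choice]" else "[choice]_[/choice]"
def pvFrag (i j : Int) : String :=
  if i = j then (if j = 0 then ". [singlechoice][choice value=1]_[/choice]" else " . [choice value=1]_[/choice]")
  else (if j = 0 then ((if j ≠ 0 then " " else "") ++ ". [singlechoice][choice]_[/choice]") else " . [choice]_[/choice]")

theorem pvJoin_nil (sep : String) : PySem.Str.join sep [] = "" := by
  apply String.toList_inj.mp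
  simp [PySem.Str.toList_join, PySem.Chars.join_nil]

theorem pvJoinE_cons (x : String) (xs : List String) :
    PySem.Str.join "" (x :: xs) = x ++ PySem.Str.join "" xs := by
  apply String.toList_inj.mp
  cases xs with
  | nil => simp [PySem.Str.toList_join, PySem.Chars.join_singleton, PySem.Chars.join_nil]
  | cons y ys =>
      simp [PySem.Str.toList_join, PySem.Chars.join_cons_cons]

theorem pvJoinSep_cons (sep x : String) (xs : List String) :
    PySem.Str.join sep (x :: xs) = x ++ PySem.Str.join "" (xs.map (sep ++ ·)) := by
  induction xs generalizing x with
  | nil => simp [pvJoin_nil]; apply String.toList_inj.mp; simp [PySem.Str.toList_join, PySem.Chars.join_singleton]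
  | cons y ys ih =>
      have h1 : PySem.Str.join sep (x :: y :: ys) = x ++ sep ++ PySem.Str.join sep (y :: ys) := by
        apply String.toList_inj.mp
        simp [PySem.Str.toList_join, PySem.Chars.join_cons_cons]
      rw [h1, ih y, List.map_cons, pvJoinE_cons]
      simp [String.append_assoc]

theorem pvFoldlF (f : Int → String) (l : List Int) : ∀ s : String,
    l.foldl (fun s j => s ++ f j) s = s ++ PySem.Str.join "" (l.map f) := by
  induction l with
  | nil => intro s; simp [pvJoin_nil]
  | cons a l ih =>
      intro s
      simp only [List.foldl_cons, List.map_cons, pvJoinE_cons]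
      rw [ih]
      simp [String.append_assoc]

theorem pvPairFold (f g : Int → String) (l : List Int) : ∀ a b : String,
    l.foldl (fun (p : String × String) j => (p.1 ++ f j, p.2 ++ g j)) (a, b) =
      (l.foldl (fun s j => s ++ f j) a, l.foldl (fun s j => s ++ g j) b) := by
  induction l with
  | nil => intro a b; rfl
  | cons x xs ih => intro a b; simpa using ih (a ++ f x) (b ++ g x)

theorem pvOuterFold (u v : Int → String) (l : List Int) : ∀ as bs : List String,
    l.foldl (fun (st : List String × List String) i => (st.1 ++ [u i], st.2 ++ [v i])) (as, bs) =
      (as ++ l.map u, bs ++ l.map v) := by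
  induction l with
  | nil => intro as bs; simp
  | cons x xs ih => intro as bs; simpa using ih (as ++ [u x]) (bs ++ [v x])

theorem pvSetRep (n i : Int) (h0 : 0 ≤ i) (h : i < n) (a b : String) :
    (List.replicate n.toNat a).set i.toNat b =
      (PySem.List.pyRange 0 n 1).map (fun j => if i = j then b else a) := by
  apply List.ext_getElem
  · simp [PySem.List.length_pyRange_one]
  · intro k h1 h2
    simp only [List.getElem_set, List.getElem_replicate, List.getElem_map,
      PySem.List.getElem_pyRange_one]
    split_ifs with hA hB hB <;> first | rfl | omega

theorem pvInputEq (n i : Int) (h0 : 0 ≤ i) (h : i < n) :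
    (PySem.List.pyRange 0 n 1).foldl (fun s j => s ++ pvTok i j) "_" =
      "_" ++ PySem.Str.join "" ((List.replicate n.toNat "~_").set i.toNat "=_") := by
  rw [pvSetRep n i h0 h, pvFoldlF]
  rfl

theorem pvFrag_zero (i : Int) : pvFrag i 0 = ". [singlechoice]" ++ pvCh i 0 := by
  by_cases hi : i = 0 <;> simp [pvFrag, pvCh, hi]

theorem pvFrag_pos (i j : Int) (hj : j ≠ 0) : pvFrag i j = " . " ++ pvCh i j := by
  by_cases hi : i = j <;> simp [pvFrag, pvCh, hi, hj]

theorem pvOutputEq (n i : Int) (p : String) (h0 : 0 ≤ i) (h : i < n) :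
    (PySem.List.pyRange 0 n 1).foldl (fun s j => s ++ pvFrag i j) (p ++ "_ ") =
      (p ++ "_ . [singlechoice]") ++
        PySem.Str.join " . "
          ((List.replicate n.toNat "[choice]_[/choice]").set i.toNat "[choice value=1]_[/choice]") := by
  have hn : (0 : Int) < n := lt_of_le_of_lt h0 h
  rw [pvSetRep n i h0 h, PySem.List.pyRange_one_cons hn, List.map_cons, List.foldl_cons]
  have hcong : (PySem.List.pyRange (0+1) n 1).foldl (fun s j => s ++ pvFrag i j)
      ((p ++ "_ ") ++ pvFrag i 0) =
      (PySem.List.pyRange (0+1) n 1).foldl (fun s j => s ++ (" . " ++ pvCh i j))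
      ((p ++ "_ ") ++ pvFrag i 0) := by
    apply PySem.List.foldl_congr_mem
    intro acc j hj
    have : (0:Int) + 1 ≤ j := (PySem.List.mem_pyRange_one.mp hj).1
    rw [pvFrag_pos i j (by omega)]
  rw [hcong, pvFoldlF (fun j => " . " ++ pvCh i j), pvJoinSep_cons]
  have hmm : ((PySem.List.pyRange (0+1) n 1).map (fun j => if i = j then "[choice value=1]_[/choice]" else "[choice]_[/choice]")).map (" . " ++ ·) =
      (PySem.List.pyRange (0+1) n 1).map (fun j => " . " ++ pvCh i j) := by
    simp [List.map_map, pvCh, Function.comp]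
  rw [hmm, pvFrag_zero]
  have hlit : (p ++ "_ ") ++ ". [singlechoice]" = p ++ "_ . [singlechoice]" := by
    rw [String.append_assoc, show ("_ " ++ ". [singlechoice]" : String) = "_ . [singlechoice]" from by decide]
  show (p ++ "_ ") ++ (". [singlechoice]" ++ pvCh i 0) ++ _ = _
  rw [← String.append_assoc, hlit]
  simp [pvCh, String.append_assoc]

-- ===== VERDICT (by name: the statement is the Claim_ definition above) =====
theorem single_choice_question_generate_spec : Claim_equal_single_choice_question_generate := by
  intro n is_item _
  unfold Spec_single_choice_question_generate
  unfold single_choice_question_generate single_choice_question_generate_alt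
  simp only []
  rw [pvOuterFold, pvOuterFold]
  refine Prod.ext ?_ ?_
  · simp only [List.nil_append]
    apply List.map_congr_left
    intro i hi
    obtain ⟨hi0, hin⟩ := PySem.List.mem_pyRange_one.mp hi
    have hbody : (fun (p : String × String) j =>
        if i = j then
          (p.1 ++ "=_",
           p.2 ++ (if j = 0 then ". [singlechoice][choice value=1]_[/choice]" else " . [choice value=1]_[/choice]"))
        else
          (p.1 ++ "~_",
           p.2 ++ (if j = 0 then ((if j ≠ 0 then " " else "") ++ ". [singlechoice][choice]_[/choice]") else " . [choice]_[/choice]")))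
        = fun (p : String × String) j => (p.1 ++ pvTok i j, p.2 ++ pvFrag i j) := by
      funext p j
      by_cases hij : i = j <;> simp [pvTok, pvFrag, hij]
    rw [hbody, pvPairFold]
    exact pvInputEq n i hi0 hin
  · simp only [List.nil_append]
    apply List.map_congr_left
    intro i hi
    obtain ⟨hi0, hin⟩ := PySem.List.mem_pyRange_one.mp hi
    have hbody : (fun (p : String × String) j =>
        if i = j then
          (p.1 ++ "=_",
           p.2 ++ (if j = 0 then ". [singlechoice][choice value=1]_[/choice]" else " . [choice value=1]_[/choice]"))
        else
          (p.1 ++ "~_",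
           p.2 ++ (if j = 0 then ((if j ≠ 0 then " " else "") ++ ". [singlechoice][choice]_[/choice]") else " . [choice]_[/choice]")))
        = fun (p : String × String) j => (p.1 ++ pvTok i j, p.2 ++ pvFrag i j) := by
      funext p j
      by_cases hij : i = j <;> simp [pvTok, pvFrag, hij]
    rw [hbody, pvPairFold]
    simp only []
    rw [pvOutputEq n i _ hi0 hin]
    simp [String.append_assoc]
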